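-- pv_equiv track=rewrite | github.com/cbolk/CS2020-21 | maze.py | sameListOfWords
-- ===== SOURCE A (Python) =====
-- FOUND = 1
--
-- NOTFOUND = 0
--
-- def sameListOfWords(lst1, lst2):
--     nwords1 = len(lst1)
--     nwords2 = len(lst2)
--     if nwords1 == nwords2:
--         count = [NOTFOUND]*nwords1
--         ris = True
--         for word in lst1:   #for every word in first list
--             found = False
--             for i in range(0, nwords2): # look in second list
--                 if lst2[i] == word and count[i] == NOTFOUND:    # if you find it and it is the first time
--                     count[i] = FOUND                            # mark it found
--                     found = True
--                     break
--                 elif lst2[i] == word and count[i] == FOUND:     # it is the second time you find it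
--                     ris = False
--                     break
--             if not found:
--                 ris = False
--                 break           # useless to continue
--         # we have already verified same length, so if all words are found, everything is ok
--     else:
--         ris = False
--     return ris
-- ===== SOURCE B (Python) =====
-- def sameListOfWords(lst1, lst2):
--     if len(lst1) != len(lst2):
--         return False
--     counts = {}
--     for w in lst1:
--         counts[w] = counts.get(w, 0) + 1
--     for w in lst2:
--         c = counts.get(w, 0)
--         if c == 0:
--             return False
--         counts[w] = c - 1
--     return True
-- ===== Notes on version B (the rewrite author's own statement) =====
-- stated objective: alternative
-- what changed: B checks multiset equality in one pass with a hash-map counter (count lst1, then consume along lst2) instead of A's per-word linear scan of lst2 with a marked-index array; B also returns True on duplicate-containing permutations where A's first-occurrence marking wrongly returns False.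
-- intended difference: On pairs that are permutations of each other but where lst1 contains a duplicate word, A returns False (its scan always re-hits the already-marked first occurrence in lst2), while B returns True, which is the intended answer for a same-words check. — e.g. on sameListOfWords(["a", "a"], ["a", "a"]): A returns false, B returns true
import Mathlib
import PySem

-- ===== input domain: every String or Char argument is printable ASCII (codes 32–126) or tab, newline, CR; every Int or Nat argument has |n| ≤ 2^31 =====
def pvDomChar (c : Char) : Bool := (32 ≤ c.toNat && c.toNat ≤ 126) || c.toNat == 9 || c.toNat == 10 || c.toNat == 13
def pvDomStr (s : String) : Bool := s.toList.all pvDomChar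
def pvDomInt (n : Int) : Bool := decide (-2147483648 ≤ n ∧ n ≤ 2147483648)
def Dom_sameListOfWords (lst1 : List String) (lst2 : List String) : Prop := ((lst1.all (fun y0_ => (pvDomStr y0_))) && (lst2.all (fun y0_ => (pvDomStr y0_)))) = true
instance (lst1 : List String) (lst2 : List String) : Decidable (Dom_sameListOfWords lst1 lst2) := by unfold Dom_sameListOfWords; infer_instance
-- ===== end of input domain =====

-- B replaces A's quadratic marked-index scan by a one-pass hash-map counter check of
-- multiset equality, and fixes A's wrong False on duplicate-containing permutations.

-- ===== PORT A =====
-- inner 'for i in range(0, nwords2)' loop: walks lst2 and the count list in step;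
-- returns some count' if the word was found and marked, none if the loop sets ris=False
-- (duplicate hit) or runs out without finding the word (both make the outer loop return False).
def pvFindMark (word : String) : List String → List Int → Option (List Int)
  | w :: ws, c :: cs =>
      if w == word && c == (0 : Int) then some ((1 : Int) :: cs)
      else if w == word && c == (1 : Int) then none
      else (pvFindMark word ws cs).map (fun cs' => c :: cs')
  | _, _ => none

-- outer 'for word in lst1' loop with its break
def pvOuter : List String → List String → List Int → Bool
  | [], _, _ => true
  | w :: ws, lst2, count =>
      match pvFindMark w lst2 count with
      | some count' => pvOuter ws lst2 count'
      | none => false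

def sameListOfWords (lst1 : List String) (lst2 : List String) : Bool :=
  let nwords1 := lst1.length
  let nwords2 := lst2.length
  if nwords1 == nwords2 then
    pvOuter lst1 lst2 (List.replicate nwords1 (0 : Int))
  else
    false

-- ===== PORT B =====
-- second loop of Source B, with its early 'return False'
def pvConsume : List String → PySem.Dict String Int → Bool
  | [], _ => true
  | w :: ws, d =>
      let c := d.getD w 0
      if c == (0 : Int) then false
      else pvConsume ws (d.insert w (c - 1))

def sameListOfWords_alt (lst1 : List String) (lst2 : List String) : Bool :=
  if lst1.length != lst2.length then false
  else
    pvConsume lst2 (lst1.foldl (fun d w => d.insert w (d.getD w 0 + 1)) PySem.Dict.empty)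

-- ===== PRECONDITION & SPEC =====
-- On permutation pairs where lst1 contains a duplicate word, A returns False (its scan always
-- re-hits the already-marked first occurrence in lst2) while B returns True, the intended answer.
def D_sameListOfWords (lst1 : List String) (lst2 : List String) : Prop :=
  lst1.Perm lst2 ∧ ¬ lst1.Nodup
instance (lst1 : List String) (lst2 : List String) : Decidable (D_sameListOfWords lst1 lst2) := by
  unfold D_sameListOfWords; infer_instance

def Spec_sameListOfWords (lst1 : List String) (lst2 : List String) (out : Bool) : Prop :=
  ¬ D_sameListOfWords lst1 lst2 → out = sameListOfWords_alt lst1 lst2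
instance (lst1 : List String) (lst2 : List String) (out : Bool) : Decidable (Spec_sameListOfWords lst1 lst2 out) := by
  unfold Spec_sameListOfWords; infer_instance

def pvDiffWitness_sameListOfWords : List String × List String := (["a", "a"], ["a", "a"])
def pvDiffWitnessOut_sameListOfWords : Bool × Bool := (false, true)

-- ===== CLAIM (what is proved, stated in full; the proofs are below) =====
def Claim_unchanged_sameListOfWords : Prop := ∀ (lst1 : List String) (lst2 : List String), Dom_sameListOfWords lst1 lst2 → Spec_sameListOfWords lst1 lst2 (sameListOfWords lst1 lst2)
def Claim_changed_sameListOfWords : Prop := Dom_sameListOfWords (pvDiffWitness_sameListOfWords.1) (pvDiffWitness_sameListOfWords.2) ∧ D_sameListOfWords (pvDiffWitness_sameListOfWords.1) (pvDiffWitness_sameListOfWords.2) ∧ sameListOfWords (pvDiffWitness_sameListOfWords.1) (pvDiffWitness_sameListOfWords.2) = pvDiffWitnessOut_sameListOfWords.1 ∧ sameListOfWords_alt (pvDiffWitness_sameListOfWords.1) (pvDiffWitness_sameListOfWords.2) = pvDiffWitnessOut_sameListOfWords.2 ∧ pvDiffWitnessOut_sameListOfWords.1 ≠ pvDiffWitn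essOut_sameListOfWords.2
def Claim_exact_sameListOfWords : Prop := ∀ (lst1 : List String) (lst2 : List String), Dom_sameListOfWords lst1 lst2 → D_sameListOfWords lst1 lst2 → sameListOfWords lst1 lst2 ≠ sameListOfWords_alt lst1 lst2

-- ===== LEMMAS AND PROOFS =====

-- 'marks S l2' is the count list after the first occurrences of the words in S have been marked
def marks (S : List String) : List String → List Int
  | [] => []
  | w :: ws => if w ∈ S then (1 : Int) :: marks (S.erase w) ws else (0 : Int) :: marks S ws

theorem marks_nil (l : List String) : marks [] l = List.replicate l.length (0 : Int) := by
  induction l with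
  | nil => rfl
  | cons w ws ih => simp [marks, ih, List.replicate]

theorem pvFindMark_mem (word : String) (S : List String) (l : List String)
    (h : word ∈ S) : pvFindMark word l (marks S l) = none := by
  induction l generalizing S with
  | nil => rfl
  | cons w ws ih =>
    by_cases hw : w ∈ S
    · simp only [marks, if_pos hw, pvFindMark]
      by_cases he : w = word
      · simp [he]
      · simp only [show (w == word) = false by simp [he], Bool.false_and, if_neg, reduceIte]
        rw [ih (S.erase w) (List.mem_erase_of_ne (fun hh => he hh.symm) |>.mpr h)]
        rfl
    · simp only [marks, if_neg hw, pvFindMark]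
      by_cases he : w = word
      · exact absurd (he ▸ h) hw
      · simp only [show (w == word) = false by simp [he], Bool.false_and, reduceIte]
        rw [ih S h]
        rfl

theorem pvFindMark_not_mem (word : String) (S : List String) (l : List String)
    (hS : word ∉ S) (hl : word ∈ l) :
    pvFindMark word l (marks S l) = some (marks (word :: S) l) := by
  induction l generalizing S with
  | nil => cases hl
  | cons w ws ih =>
    by_cases he : w = word
    · subst he
      simp only [marks, if_neg hS, pvFindMark, beq_self_eq_true, Bool.true_and]
      simp [List.erase_cons_head]
    · have hl' : word ∈ ws := by
        rcases List.mem_cons.mp hl with h | h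
        · exact absurd h.symm he
        · exact h
      by_cases hw : w ∈ S
      · have hS' : word ∉ S.erase w := fun hmem => hS (List.mem_of_mem_erase hmem)
        have herase : (word :: S).erase w = word :: S.erase w :=
          List.erase_cons_tail (by simp only [ne_eq, beq_iff_eq]; exact fun hh => he hh.symm)
        simp only [marks, if_pos hw, if_pos (List.mem_cons_of_mem word hw), herase, pvFindMark]
        rw [if_neg (by simp [he]), if_neg (by simp [he]), ih (S.erase w) hS' hl']
        rfl
      · have hwS' : w ∉ word :: S := by
          intro hmem
          rcases List.mem_cons.mp hmem with hh | hh
          · exact he hh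
          · exact hw hh
        simp only [marks, if_neg hw, if_neg hwS', pvFindMark]
        rw [if_neg (by simp [he]), if_neg (by simp [he]), ih S hS hl']
        rfl

theorem pvFindMark_not_in_list (word : String) (l : List String) (cs : List Int)
    (hl : word ∉ l) : pvFindMark word l cs = none := by
  induction l generalizing cs with
  | nil => cases cs <;> rfl
  | cons w ws ih =>
    cases cs with
    | nil => rfl
    | cons c cs =>
      have he : w ≠ word := fun h => hl (h ▸ List.mem_cons_self)
      simp only [pvFindMark, show (w == word) = false by simp [he], Bool.false_and, reduceIte]
      rw [ih cs (fun h => hl (List.mem_cons_of_mem _ h))]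
      rfl

theorem pvOuter_char (l1 l2 : List String) (S : List String) :
    pvOuter l1 l2 (marks S l2) = true ↔
      l1.Nodup ∧ (∀ w ∈ l1, w ∉ S) ∧ l1 ⊆ l2 := by
  induction l1 generalizing S with
  | nil => simp [pvOuter, List.nodup_nil]
  | cons w ws ih =>
    by_cases hS : w ∈ S
    · simp only [pvOuter, pvFindMark_mem w S l2 hS]
      constructor
      · intro h; cases h
      · rintro ⟨_, h2, _⟩; exact absurd hS (h2 w List.mem_cons_self)
    · by_cases hl : w ∈ l2
      · simp only [pvOuter, pvFindMark_not_mem w S l2 hS hl]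
        rw [ih (w :: S)]
        constructor
        · rintro ⟨hnd, hnotin, hsub⟩
          refine ⟨List.nodup_cons.mpr ⟨fun hmem => ?_, hnd⟩, ?_, ?_⟩
          · exact (hnotin w hmem) (List.mem_cons_self)
          · intro v hv
            rcases List.mem_cons.mp hv with hv | hv
            · exact hv ▸ hS
            · exact fun hvS => (hnotin v hv) (List.mem_cons_of_mem _ hvS)
          · intro v hv
            rcases List.mem_cons.mp hv with hv | hv
            · exact hv ▸ hl
            · exact hsub hv
        · rintro ⟨hnd, hnotin, hsub⟩
          rcases List.nodup_cons.mp hnd with ⟨hwws, hnd'⟩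
          refine ⟨hnd', ?_, fun v hv => hsub (List.mem_cons_of_mem _ hv)⟩
          intro v hv hvS
          rcases List.mem_cons.mp hvS with hvw | hvS
          · exact hwws (hvw ▸ hv)
          · exact (hnotin v (List.mem_cons_of_mem _ hv)) hvS
      · simp only [pvOuter, pvFindMark_not_in_list w l2 (marks S l2) hl]
        constructor
        · intro h; cases h
        · rintro ⟨_, _, hsub⟩; exact absurd (hsub List.mem_cons_self) hl

theorem sameListOfWords_char (l1 l2 : List String) :
    sameListOfWords l1 l2 = true ↔
      l1.length = l2.length ∧ l1.Nodup ∧ l1 ⊆ l2 := by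
  simp only [sameListOfWords]
  by_cases h : l1.length = l2.length
  · rw [if_pos (by simpa using h),
      show List.replicate l1.length (0 : Int) = marks [] l2 by rw [marks_nil, h],
      pvOuter_char]
    simp [h]
  · rw [if_neg (by simpa using h)]
    simp [h]

theorem pvConsume_char (l : List String) (d : PySem.Dict String Int)
    (hpos : ∀ v, 0 ≤ d.getD v 0) :
    pvConsume l d = true ↔ ∀ w ∈ l, (l.count w : Int) ≤ d.getD w 0 := by
  induction l generalizing d with
  | nil => simp [pvConsume]
  | cons w ws ih =>
    simp only [pvConsume]
    by_cases hc : d.getD w 0 = 0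
    · rw [if_pos (by simp [hc])]
      constructor
      · intro h; cases h
      · intro h
        have h1 := h w List.mem_cons_self
        rw [hc, List.count_cons_self] at h1
        have h2 : (ws.count w : Int) + 1 ≤ 0 := by exact_mod_cast h1
        have := Int.natCast_nonneg (ws.count w)
        omega
    · have hge : (1 : Int) ≤ d.getD w 0 := by have := hpos w; omega
      have hpos' : ∀ v, 0 ≤ (d.insert w (d.getD w 0 - 1)).getD v 0 := by
        intro v
        rw [PySem.Dict.getD_insert]
        by_cases hvw : v = w
        · rw [if_pos hvw]; omega
        · rw [if_neg hvw]; exact hpos v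
      rw [if_neg (by simp [hc]), ih _ hpos']
      constructor
      · intro h v hv
        by_cases hvw : v = w
        · subst hvw
          by_cases hmem : v ∈ ws
          · have h1 := h v hmem
            rw [PySem.Dict.getD_insert, if_pos rfl] at h1
            rw [List.count_cons_self]
            push_cast
            omega
          · rw [List.count_cons_self, List.count_eq_zero_of_not_mem hmem]
            push_cast
            omega
        · have hv' : v ∈ ws := by
            rcases List.mem_cons.mp hv with hh | hh
            · exact absurd hh hvw
            · exact hh
          have h1 := h v hv'
          rw [PySem.Dict.getD_insert, if_neg hvw] at h1
          rw [List.count_cons_of_ne (fun hh => hvw hh.symm)]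
          exact h1
      · intro h v hv
        rw [PySem.Dict.getD_insert]
        by_cases hvw : v = w
        · subst hvw
          have h1 := h v List.mem_cons_self
          rw [List.count_cons_self] at h1
          rw [if_pos rfl]
          push_cast at h1 ⊢
          omega
        · rw [if_neg hvw]
          have h1 := h v (List.mem_cons_of_mem _ hv)
          rw [List.count_cons_of_ne (fun hh => hvw hh.symm)] at h1
          exact h1

theorem sameListOfWords_alt_char (l1 l2 : List String) :
    sameListOfWords_alt l1 l2 = true ↔ l1.Perm l2 := by
  unfold sameListOfWords_alt
  rw [PySem.Dict.foldl_insert_getD_add_one_eq_counter]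
  by_cases h : l1.length = l2.length
  · have hpos : ∀ v, 0 ≤ (PySem.Dict.counter l1).getD v 0 := by
      intro v
      rw [PySem.Dict.getD_counter]
      exact Int.natCast_nonneg _
    rw [if_neg (by simp [h]), pvConsume_char l2 _ hpos]
    constructor
    · intro hcount
      have hsub : List.Subperm l2 l1 := by
        rw [List.subperm_ext_iff]
        intro v hv
        have := hcount v hv
        rw [PySem.Dict.getD_counter] at this
        exact_mod_cast this
      exact (hsub.perm_of_length_le (le_of_eq h)).symm
    · intro hperm v _
      rw [PySem.Dict.getD_counter]
      exact_mod_cast le_of_eq (hperm.symm.count_eq v)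
  · rw [if_pos (by simpa using h)]
    constructor
    · intro hh; cases hh
    · intro hperm; exact absurd hperm.length_eq h

theorem A_true_imp_perm (l1 l2 : List String)
    (hlen : l1.length = l2.length) (hnd : l1.Nodup) (hsub : l1 ⊆ l2) :
    l1.Perm l2 := (hnd.subperm hsub).perm_of_length_le (le_of_eq hlen.symm)

-- ===== VERDICT (by name: the statement is the Claim_ definition above) =====
theorem sameListOfWords_spec : Claim_unchanged_sameListOfWords := by
  intro l1 l2 _
  unfold Spec_sameListOfWords D_sameListOfWords
  intro hnD
  rw [Bool.eq_iff_iff, sameListOfWords_char, sameListOfWords_alt_char]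
  constructor
  · rintro ⟨hlen, hnd, hsub⟩
    exact A_true_imp_perm l1 l2 hlen hnd hsub
  · intro hperm
    have hnd : l1.Nodup := by
      by_contra hnd
      exact hnD ⟨hperm, hnd⟩
    exact ⟨hperm.length_eq, hnd, hperm.subset⟩

theorem sameListOfWords_changed : Claim_changed_sameListOfWords := by
  unfold Claim_changed_sameListOfWords; decide

theorem sameListOfWords_tight : Claim_exact_sameListOfWords := by
  intro l1 l2 _ hD
  rcases hD with ⟨hperm, hnd⟩
  have hA : sameListOfWords l1 l2 = false := by
    rw [Bool.eq_false_iff]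
    intro h
    exact hnd ((sameListOfWords_char l1 l2).mp h).2.1
  have hB : sameListOfWords_alt l1 l2 = true := (sameListOfWords_alt_char l1 l2).mpr hperm
  rw [hA, hB]
  exact Bool.false_ne_true
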